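-- pv_equiv track=rewrite | github.com/zhanglined/Axelrod | axelrod/strategies/hunter.py | detect_eventual_cycle
-- ===== SOURCE A (Python) =====
-- import itertools
--
-- def detect_eventual_cycle(history, offset=15):
--     """Detects if there is a cycle in the opponent's history."""
--     history_tail = history[-offset:]
--     for i in range(len(history_tail) // 2):
--         test_cycle = history_tail[: i + 1]
--         cycle = itertools.cycle(test_cycle)
--         cycle_list = list(itertools.islice(cycle, 0, len(history_tail)))
--         if history_tail == cycle_list:
--             return True
--     return False
-- ===== SOURCE B (Python) =====
-- def detect_eventual_cycle(history, offset=15):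
--     """Detects if there is a cycle in the opponent's history."""
--     tail = history[-offset:]
--     n = len(tail)
--     limit = n // 2
--     active = []
--     for j in range(1, n):
--         if j <= limit:
--             active.append(j)
--         elif not active:
--             return False
--         v = tail[j]
--         active = [p for p in active if tail[j - p] == v]
--     return bool(active)
-- ===== Notes on version B (the rewrite author's own statement) =====
-- stated objective: faster
-- what changed: A tries each candidate period separately and, for every candidate, materialises a full-length cyclic repetition of the prefix and compares whole lists; B makes one left-to-right pass over the tail maintaining the list of still-alive candidate periods (a candidate p enters at position p, is filtered by a single element comparison per position, and the pass stops as soon as no candidate is alive or to come).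
import Mathlib
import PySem

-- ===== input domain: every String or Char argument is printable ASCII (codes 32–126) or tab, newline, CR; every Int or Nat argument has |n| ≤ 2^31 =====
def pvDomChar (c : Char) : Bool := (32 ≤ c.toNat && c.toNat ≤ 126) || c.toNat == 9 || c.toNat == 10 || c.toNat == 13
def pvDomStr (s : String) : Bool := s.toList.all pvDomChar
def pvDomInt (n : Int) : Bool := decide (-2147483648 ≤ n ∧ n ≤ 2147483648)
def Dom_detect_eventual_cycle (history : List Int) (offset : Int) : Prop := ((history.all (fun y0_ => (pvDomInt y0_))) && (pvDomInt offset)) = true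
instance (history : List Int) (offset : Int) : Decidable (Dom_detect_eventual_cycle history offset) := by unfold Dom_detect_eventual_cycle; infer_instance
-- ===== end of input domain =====

-- B replaces A's per-period rebuild-and-compare (Θ(n²) whenever no short cycle exists) by one
-- left-to-right pass that maintains the list of still-alive candidate periods (objective: faster).

-- ===== PORT A =====
-- list(itertools.islice(itertools.cycle(tc), 0, n)): element j is tc[j % len(tc)];
-- exact here since tc = tail[:i+1] is nonempty whenever the loop body runs (getD default unused).
def pvCycleTake (tc : List Int) (n : Nat) : List Int :=
  (List.range n).map (fun j => tc.getD (j % tc.length) 0)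

def detect_eventual_cycle (history : List Int) (offset : Int) : Bool :=
  let t := PySem.List.slice history (some (-offset)) none   -- history[-offset:]
  -- for i in range(len(t)//2): if t == cycle_list: return True / return False
  (List.range (t.length / 2)).any (fun i => t == pvCycleTake (t.take (i + 1)) t.length)

-- ===== PORT B =====
-- the for-j loop of Source B: active = surviving candidate periods; a candidate j is born when j ≤ limit,
-- the loop exits False early when no candidate is alive nor to be born
def pvSieve (t : List Int) (limit : Nat) (active : List Nat) : List Nat → Bool
  | [] => !active.isEmpty
  | j :: js =>
    if j ≤ limit then
      pvSieve t limit ((active ++ [j]).filter (fun p => t.getD (j - p) 0 == t.getD j 0)) js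
    else if active.isEmpty then false
    else pvSieve t limit (active.filter (fun p => t.getD (j - p) 0 == t.getD j 0)) js

def detect_eventual_cycle_alt (history : List Int) (offset : Int) : Bool :=
  let t := PySem.List.slice history (some (-offset)) none   -- history[-offset:]
  pvSieve t (t.length / 2) [] (List.range' 1 (t.length - 1))   -- for j in range(1, len(t))

-- ===== PRECONDITION & SPEC =====
def Spec_detect_eventual_cycle (history : List Int) (offset : Int) (out : Bool) : Prop := out = detect_eventual_cycle_alt history offset
instance (history : List Int) (offset : Int) (out : Bool) : Decidable (Spec_detect_eventual_cycle history offset out) := by unfold Spec_detect_eventual_cycle; infer_instance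

-- ===== CLAIM (what is proved, stated in full; the proofs are below) =====
def Claim_equal_detect_eventual_cycle : Prop := ∀ (history : List Int) (offset : Int), Dom_detect_eventual_cycle history offset → Spec_detect_eventual_cycle history offset (detect_eventual_cycle history offset)

-- ===== LEMMAS AND PROOFS =====

-- B's loop returns true iff some candidate alive now survives the rest, or some candidate yet to be
-- born (an element of js that is ≤ limit) satisfies the filter at every later position.
theorem pvSieve_iff (t : List Int) (limit : Nat) :
    ∀ (js active : List Nat), js.Pairwise (· < ·) →
      (pvSieve t limit active js = true ↔
        ∃ p, (p ∈ active ∧ ∀ j ∈ js, t.getD (j - p) 0 = t.getD j 0)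
           ∨ (p ∈ js ∧ p ≤ limit ∧ ∀ j ∈ js, p ≤ j → t.getD (j - p) 0 = t.getD j 0)) := by
  intro js
  induction js with
  | nil =>
    intro active _
    rw [pvSieve]
    constructor
    · intro h
      have hne : active ≠ [] := by simpa using h
      obtain ⟨p, hp⟩ := List.exists_mem_of_ne_nil active hne
      exact ⟨p, Or.inl ⟨hp, fun j hj => by simp at hj⟩⟩
    · rintro ⟨p, ⟨hp, _⟩ | ⟨hp, _⟩⟩
      · simpa using List.ne_nil_of_mem hp
      · simp at hp
  | cons j js ih =>
    intro active hpw
    rw [List.pairwise_cons] at hpw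
    obtain ⟨hlt, hpw'⟩ := hpw
    by_cases hj : j ≤ limit
    · rw [pvSieve, if_pos hj, ih _ hpw']
      constructor
      · rintro ⟨p, hc⟩
        rcases hc with ⟨hmem, hall⟩ | ⟨hmem, hle, hall⟩
        · rw [List.mem_filter] at hmem
          obtain ⟨hmem, hcj⟩ := hmem
          rw [beq_iff_eq] at hcj
          rcases List.mem_append.mp hmem with ha | hb
          · refine ⟨p, Or.inl ⟨ha, ?_⟩⟩
            intro j' hj'
            rcases List.mem_cons.mp hj' with h | h
            · rw [h]; exact hcj
            · exact hall j' h
          · have hpj : p = j := by simpa using hb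
            subst hpj
            refine ⟨p, Or.inr ⟨List.mem_cons.mpr (Or.inl rfl), hj, ?_⟩⟩
            intro j' hj' _
            rcases List.mem_cons.mp hj' with h | h
            · rw [h]; exact hcj
            · exact hall j' h
        · refine ⟨p, Or.inr ⟨List.mem_cons_of_mem _ hmem, hle, ?_⟩⟩
          intro j' hj' hpj'
          rcases List.mem_cons.mp hj' with h | h
          · exact absurd (hlt p hmem) (by omega)
          · exact hall j' h hpj'
      · rintro ⟨p, hc⟩
        rcases hc with ⟨ha, hall⟩ | ⟨hmem, hle, hall⟩
        · refine ⟨p, Or.inl ⟨List.mem_filter.mpr ⟨List.mem_append_left _ ha,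
            beq_iff_eq.mpr (hall j (List.mem_cons.mpr (Or.inl rfl)))⟩, ?_⟩⟩
          intro j' hj'
          exact hall j' (List.mem_cons_of_mem _ hj')
        · rcases List.mem_cons.mp hmem with h | h
          · subst h
            refine ⟨p, Or.inl ⟨List.mem_filter.mpr ⟨List.mem_append_right _ (by simp),
              beq_iff_eq.mpr (hall p (List.mem_cons.mpr (Or.inl rfl)) le_rfl)⟩, ?_⟩⟩
            intro j' hj'
            exact hall j' (List.mem_cons_of_mem _ hj') (le_of_lt (hlt j' hj'))
          · refine ⟨p, Or.inr ⟨h, hle, ?_⟩⟩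
            intro j' hj' hpj'
            exact hall j' (List.mem_cons_of_mem _ hj') hpj'
    · rw [pvSieve, if_neg hj]
      by_cases he : active.isEmpty
      · rw [if_pos he]
        have hae : active = [] := by simpa using he
        subst hae
        constructor
        · intro h; exact absurd h (by simp)
        · rintro ⟨p, ⟨hp, _⟩ | ⟨hmem, hle, _⟩⟩
          · simp at hp
          · rcases List.mem_cons.mp hmem with h | h
            · subst h; exact absurd hle hj
            · exact absurd hle (by have := hlt p h; omega)
      · rw [if_neg he, ih _ hpw']
        constructor
        · rintro ⟨p, hc⟩
          rcases hc with ⟨hmem, hall⟩ | ⟨hmem, hle, hall⟩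
          · rw [List.mem_filter] at hmem
            obtain ⟨hmem, hcj⟩ := hmem
            rw [beq_iff_eq] at hcj
            refine ⟨p, Or.inl ⟨hmem, ?_⟩⟩
            intro j' hj'
            rcases List.mem_cons.mp hj' with h | h
            · rw [h]; exact hcj
            · exact hall j' h
          · refine ⟨p, Or.inr ⟨List.mem_cons_of_mem _ hmem, hle, ?_⟩⟩
            intro j' hj' hpj'
            rcases List.mem_cons.mp hj' with h | h
            · exact absurd (hlt p hmem) (by omega)
            · exact hall j' h hpj'
        · rintro ⟨p, hc⟩
          rcases hc with ⟨ha, hall⟩ | ⟨hmem, hle, hall⟩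
          · refine ⟨p, Or.inl ⟨List.mem_filter.mpr ⟨ha,
              beq_iff_eq.mpr (hall j (List.mem_cons.mpr (Or.inl rfl)))⟩, ?_⟩⟩
            intro j' hj'
            exact hall j' (List.mem_cons_of_mem _ hj')
          · rcases List.mem_cons.mp hmem with h | h
            · subst h; exact absurd hle hj
            · refine ⟨p, Or.inr ⟨h, hle, ?_⟩⟩
              intro j' hj' hpj'
              exact hall j' (List.mem_cons_of_mem _ hj') hpj'

-- the period predicate both programs decide, stated shift-style
def pvPeriod (t : List Int) (p : Nat) : Prop :=
  ∀ j, p ≤ j → j < t.length → t.getD (j - p) 0 = t.getD j 0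

theorem pv_alt_char (t : List Int) :
    (pvSieve t (t.length / 2) [] (List.range' 1 (t.length - 1)) = true) ↔
      ∃ p, 1 ≤ p ∧ p ≤ t.length / 2 ∧ pvPeriod t p := by
  rw [pvSieve_iff t (t.length / 2) (List.range' 1 (t.length - 1)) []
    (List.pairwise_lt_range' 1 (by norm_num))]
  constructor
  · rintro ⟨p, ⟨hp, _⟩ | ⟨hmem, hle, hall⟩⟩
    · simp at hp
    · obtain ⟨hp1, hp2⟩ := List.mem_range'_1.mp hmem
      refine ⟨p, hp1, hle, ?_⟩
      intro j hpj hjn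
      exact hall j (List.mem_range'_1.mpr ⟨by omega, by omega⟩) hpj
  · rintro ⟨p, hp1, hle, hper⟩
    refine ⟨p, Or.inr ⟨List.mem_range'_1.mpr ⟨hp1, by omega⟩, hle, ?_⟩⟩
    intro j hj hpj
    obtain ⟨hj1, hj2⟩ := List.mem_range'_1.mp hj
    exact hper j hpj (by omega)

theorem pv_cycle_char (t : List Int) (m : Nat) (h1 : 1 ≤ m) (h2 : m ≤ t.length) :
    (t = pvCycleTake (t.take m) t.length) ↔
      ∀ j < t.length, t.getD j 0 = t.getD (j % m) 0 := by
  have hlen : (pvCycleTake (t.take m) t.length).length = t.length := by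
    simp [pvCycleTake]
  have htk : ∀ i, i < m → (t.take m).getD i 0 = t.getD i 0 := by
    intro i hi
    simp [List.getD, hi]
  have hcg : ∀ j, j < t.length → (pvCycleTake (t.take m) t.length).getD j 0 = t.getD (j % m) 0 := by
    intro j hj
    have hmin : (t.take m).length = m := by simp [Nat.min_eq_left h2]
    have hmod : j % m < m := Nat.mod_lt _ (by omega)
    have hstep : (pvCycleTake (t.take m) t.length).getD j 0
        = (t.take m).getD (j % (t.take m).length) 0 := by
      simp [pvCycleTake, List.getD, hj]
    rw [hstep, hmin]
    exact htk _ hmod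
  constructor
  · intro h j hj
    have e : t.getD j 0 = (pvCycleTake (t.take m) t.length).getD j 0 := by rw [← h]
    rw [e, hcg j hj]
  · intro h
    apply List.ext_getElem (by omega)
    intro j hja hjb
    have e1 : t[j] = t.getD j 0 := (List.getD_eq_getElem t 0 hja).symm
    have e2 : (pvCycleTake (t.take m) t.length)[j] = (pvCycleTake (t.take m) t.length).getD j 0 :=
      (List.getD_eq_getElem _ 0 hjb).symm
    rw [e1, e2, hcg j hja, h j hja]

theorem pv_mod_shift (t : List Int) (p : Nat) (hp : 1 ≤ p) :
    (∀ j < t.length, t.getD j 0 = t.getD (j % p) 0) ↔ pvPeriod t p := by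
  constructor
  · intro h j hpj hjn
    have h1 := h j hjn
    have h2 := h (j - p) (by omega)
    rw [Nat.mod_eq_sub_mod hpj] at h1
    rw [h1, h2]
  · intro h j
    induction j using Nat.strong_induction_on with
    | _ j ih =>
      intro hjn
      by_cases hpj : p ≤ j
      · have e1 : t.getD (j - p) 0 = t.getD j 0 := h j hpj hjn
        have e2 : t.getD (j - p) 0 = t.getD ((j - p) % p) 0 := ih (j - p) (by omega) (by omega)
        rw [← e1, e2, Nat.mod_eq_sub_mod hpj]
      · rw [Nat.mod_eq_of_lt (by omega)]

theorem pv_a_char (t : List Int) :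
    ((List.range (t.length / 2)).any (fun i => t == pvCycleTake (t.take (i + 1)) t.length) = true) ↔
      ∃ p, 1 ≤ p ∧ p ≤ t.length / 2 ∧ pvPeriod t p := by
  simp only [List.any_eq_true, List.mem_range, beq_iff_eq]
  constructor
  · rintro ⟨i, hi, heq⟩
    refine ⟨i + 1, by omega, by omega, ?_⟩
    rw [← pv_mod_shift t (i + 1) (by omega)]
    exact (pv_cycle_char t (i + 1) (by omega) (by omega)).mp heq
  · rintro ⟨p, hp1, hp2, hper⟩
    refine ⟨p - 1, by omega, ?_⟩
    have hpe : p - 1 + 1 = p := by omega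
    rw [hpe, pv_cycle_char t p hp1 (by omega), pv_mod_shift t p hp1]
    exact hper

theorem pv_core (t : List Int) :
    ((List.range (t.length / 2)).any (fun i => t == pvCycleTake (t.take (i + 1)) t.length)) =
      pvSieve t (t.length / 2) [] (List.range' 1 (t.length - 1)) := by
  rw [Bool.eq_iff_iff, pv_a_char, pv_alt_char]

-- ===== VERDICT (by name: the statement is the Claim_ definition above) =====
theorem detect_eventual_cycle_spec : Claim_equal_detect_eventual_cycle := by
  intro history offset _
  unfold Spec_detect_eventual_cycle detect_eventual_cycle detect_eventual_cycle_alt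
  exact pv_core _
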